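-- pv_equiv track=rewrite | github.com/benjaminboehmbb/sniper-bot | tools/l1c_smoke_test.py | _summarize
-- ===== SOURCE A (Python) =====
-- from typing import Dict, List, Optional, Tuple
--
-- def _summarize(events: List[Dict[str, str]]) -> Tuple[int, int, int, int, int, int, int, Dict[str, int]]:
--     confirm_buy = 0
--     confirm_sell = 0
--     block_buy = 0
--     block_sell = 0
--
--     vote_long = 0
--     vote_short = 0
--     vote_none = 0
--
--     reason_counts: Dict[str, int] = {}
--
--     for e in events:
--         raw = (e.get("intent_1m_raw") or "").upper()
--         final = (e.get("intent_final") or "").upper()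
--
--         vd = (e.get("vote_5m_direction") or "none").lower()
--         if vd == "long":
--             vote_long += 1
--         elif vd == "short":
--             vote_short += 1
--         else:
--             vote_none += 1
--
--         rc = e.get("reason_code") or ""
--         if rc:
--             reason_counts[rc] = reason_counts.get(rc, 0) + 1
--
--         if raw == "BUY":
--             if final == "BUY":
--                 confirm_buy += 1
--             elif final == "HOLD":
--                 block_buy += 1
--         elif raw == "SELL":
--             if final == "SELL":
--                 confirm_sell += 1
--             elif final == "HOLD":
--                 block_sell += 1
--
--     return confirm_buy, confirm_sell, block_buy, block_sell, vote_long, vote_short, vote_none, reason_counts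
-- ===== SOURCE B (Python) =====
-- def _count(items):
--     c = {}
--     for x in items:
--         c[x] = c.get(x, 0) + 1
--     return c
--
-- def _summarize(events):
--     pairs = _count(((e.get("intent_1m_raw") or "").upper(),
--                     (e.get("intent_final") or "").upper()) for e in events)
--     votes = _count((e.get("vote_5m_direction") or "none").lower() for e in events)
--     reasons = _count(rc for e in events if (rc := e.get("reason_code") or ""))
--     vote_long = votes.get("long", 0)
--     vote_short = votes.get("short", 0)
--     return (pairs.get(("BUY", "BUY"), 0), pairs.get(("SELL", "SELL"), 0),
--             pairs.get(("BUY", "HOLD"), 0), pairs.get(("SELL", "HOLD"), 0),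
--             vote_long, vote_short, len(events) - vote_long - vote_short,
--             reasons)
-- ===== Notes on version B (the rewrite author's own statement) =====
-- stated objective: alternative
-- what changed: B replaces A's single loop over seven scalar accumulators and a hand-updated dict with three frequency maps built by a generic counting helper over extracted keys ((raw,final) pair, vote direction, reason code), then reads the seven scalars off the counters (vote_none as len(events) - long - short).
import Mathlib
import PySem

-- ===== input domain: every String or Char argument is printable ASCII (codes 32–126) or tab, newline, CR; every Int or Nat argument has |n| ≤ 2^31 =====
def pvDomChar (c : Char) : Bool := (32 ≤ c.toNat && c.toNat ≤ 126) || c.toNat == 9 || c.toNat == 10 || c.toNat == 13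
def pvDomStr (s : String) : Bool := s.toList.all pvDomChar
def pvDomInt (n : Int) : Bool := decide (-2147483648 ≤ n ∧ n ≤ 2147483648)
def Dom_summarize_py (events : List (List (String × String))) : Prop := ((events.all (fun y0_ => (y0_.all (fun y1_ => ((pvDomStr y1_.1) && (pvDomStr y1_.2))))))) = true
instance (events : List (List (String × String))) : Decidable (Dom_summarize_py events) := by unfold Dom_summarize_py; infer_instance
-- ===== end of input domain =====

-- B counts three key streams with a generic counter instead of branching into seven scalar accumulators; same cost, different decomposition.

-- ===== PORT A =====
-- e.get(k) or "" : first-match association-list lookup with "" for missing/empty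
def pvGetOr (e : List (String × String)) (k : String) : String := (e.lookup k).getD ""

def pvStepA (st : Int × Int × Int × Int × Int × Int × Int × PySem.Dict String Int)
    (e : List (String × String)) : Int × Int × Int × Int × Int × Int × Int × PySem.Dict String Int :=
  let (cb, cs, bb, bs, vl, vs, vn, rcs) := st
  let raw := PySem.Str.upper (pvGetOr e "intent_1m_raw")
  let fin := PySem.Str.upper (pvGetOr e "intent_final")
  let vd := PySem.Str.lower (let v := pvGetOr e "vote_5m_direction"; if v = "" then "none" else v)
  let (vl, vs, vn) :=
    if vd = "long" then (vl + 1, vs, vn)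
    else if vd = "short" then (vl, vs + 1, vn)
    else (vl, vs, vn + 1)
  let rc := pvGetOr e "reason_code"
  let rcs := if rc ≠ "" then rcs.insert rc (rcs.getD rc 0 + 1) else rcs
  let (cb, cs, bb, bs) :=
    if raw = "BUY" then
      (if fin = "BUY" then (cb + 1, cs, bb, bs)
       else if fin = "HOLD" then (cb, cs, bb + 1, bs)
       else (cb, cs, bb, bs))
    else if raw = "SELL" then
      (if fin = "SELL" then (cb, cs + 1, bb, bs)
       else if fin = "HOLD" then (cb, cs, bb, bs + 1)
       else (cb, cs, bb, bs))
    else (cb, cs, bb, bs)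
  (cb, cs, bb, bs, vl, vs, vn, rcs)

def summarize_py (events : List (List (String × String))) : Int × Int × Int × Int × Int × Int × Int × (List (String × Int)) :=
  let r := events.foldl pvStepA (0, 0, 0, 0, 0, 0, 0, PySem.Dict.empty)
  (r.1, r.2.1, r.2.2.1, r.2.2.2.1, r.2.2.2.2.1, r.2.2.2.2.2.1, r.2.2.2.2.2.2.1, r.2.2.2.2.2.2.2.items)

-- ===== PORT B =====
-- Source B's _count helper: a dict built by c[x] = c.get(x, 0) + 1
def pvCount {α : Type} [BEq α] (xs : List α) : PySem.Dict α Int :=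
  xs.foldl (fun d x => d.insert x (d.getD x 0 + 1)) PySem.Dict.empty

def pvKeyAB (e : List (String × String)) : String × String :=
  (PySem.Str.upper ((e.lookup "intent_1m_raw").getD ""),
   PySem.Str.upper ((e.lookup "intent_final").getD ""))

def pvKeyV (e : List (String × String)) : String :=
  PySem.Str.lower (let v := (e.lookup "vote_5m_direction").getD ""; if v = "" then "none" else v)

def pvKeyR (e : List (String × String)) : Option String :=
  let rc := (e.lookup "reason_code").getD ""; if rc = "" then none else some rc

def summarize_py_alt (events : List (List (String × String))) : Int × Int × Int × Int × Int × Int × Int × (List (String × Int)) :=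
  let pairs := pvCount (events.map pvKeyAB)
  let votes := pvCount (events.map pvKeyV)
  let reasons := pvCount (events.filterMap pvKeyR)
  let vote_long := votes.getD "long" 0
  let vote_short := votes.getD "short" 0
  (pairs.getD ("BUY", "BUY") 0, pairs.getD ("SELL", "SELL") 0,
   pairs.getD ("BUY", "HOLD") 0, pairs.getD ("SELL", "HOLD") 0,
   vote_long, vote_short, (events.length : Int) - vote_long - vote_short,
   reasons.items)

-- ===== PRECONDITION & SPEC =====
def Spec_summarize_py (events : List (List (String × String))) (out : Int × Int × Int × Int × Int × Int × Int × (List (String × Int))) : Prop := out = summarize_py_alt events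
instance (events : List (List (String × String))) (out : Int × Int × Int × Int × Int × Int × Int × (List (String × Int))) : Decidable (Spec_summarize_py events out) := by
  unfold Spec_summarize_py
  haveI d1 : DecidableEq (Int × List (String × Int)) := instDecidableEqProd
  haveI d2 : DecidableEq (Int × Int × List (String × Int)) := instDecidableEqProd
  haveI d3 : DecidableEq (Int × Int × Int × List (String × Int)) := instDecidableEqProd
  haveI d4 : DecidableEq (Int × Int × Int × Int × List (String × Int)) := instDecidableEqProd
  haveI d5 : DecidableEq (Int × Int × Int × Int × Int × List (String × Int)) := instDecidableEqProd
  haveI d6 : DecidableEq (Int × Int × Int × Int × Int × Int × List (String × Int)) := instDecidableEqProd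
  haveI d7 : DecidableEq (Int × Int × Int × Int × Int × Int × Int × List (String × Int)) := instDecidableEqProd
  exact d7 _ _

-- ===== CLAIM (what is proved, stated in full; the proofs are below) =====
def Claim_equal_summarize_py : Prop := ∀ (events : List (List (String × String))), Dom_summarize_py events → Spec_summarize_py events (summarize_py events)

-- ===== LEMMAS AND PROOFS =====
set_option maxHeartbeats 2000000 in
lemma pvStepA_eq (cb cs bb bs vl vs vn : Int) (d : PySem.Dict String Int)
    (e : List (String × String)) :
    pvStepA (cb, cs, bb, bs, vl, vs, vn, d) e =
      (cb + (if pvKeyAB e = ("BUY", "BUY") then 1 else 0),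
       cs + (if pvKeyAB e = ("SELL", "SELL") then 1 else 0),
       bb + (if pvKeyAB e = ("BUY", "HOLD") then 1 else 0),
       bs + (if pvKeyAB e = ("SELL", "HOLD") then 1 else 0),
       vl + (if pvKeyV e = "long" then 1 else 0),
       vs + (if pvKeyV e = "short" then 1 else 0),
       vn + (if pvKeyV e ≠ "long" ∧ pvKeyV e ≠ "short" then 1 else 0),
       match pvKeyR e with
       | none => d
       | some r => d.insert r (d.getD r 0 + 1)) := by
  simp only [pvStepA, pvKeyAB, pvKeyV, pvKeyR, pvGetOr, Prod.mk.injEq]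
  split_ifs <;> simp_all

lemma pvLoopInv (events : List (List (String × String)))
    (cb cs bb bs vl vs vn : Int) (d : PySem.Dict String Int) :
    events.foldl pvStepA (cb, cs, bb, bs, vl, vs, vn, d) =
      (cb + ((events.map pvKeyAB).count ("BUY", "BUY") : Int),
       cs + ((events.map pvKeyAB).count ("SELL", "SELL") : Int),
       bb + ((events.map pvKeyAB).count ("BUY", "HOLD") : Int),
       bs + ((events.map pvKeyAB).count ("SELL", "HOLD") : Int),
       vl + ((events.map pvKeyV).count "long" : Int),
       vs + ((events.map pvKeyV).count "short" : Int),
       vn + ((events.length : Int) - ((events.map pvKeyV).count "long" : Int)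
             - ((events.map pvKeyV).count "short" : Int)),
       (events.filterMap pvKeyR).foldl (fun d r => d.insert r (d.getD r 0 + 1)) d) := by
  induction events generalizing cb cs bb bs vl vs vn d with
  | nil => simp
  | cons e es ih =>
    simp only [List.foldl_cons, List.map_cons, List.count_cons, List.length_cons,
      List.filterMap_cons]
    rw [pvStepA_eq, ih]
    cases pvKeyR e <;>
      simp only [Prod.mk.injEq, List.foldl_cons] <;>
      refine ⟨?_, ?_, ?_, ?_, ?_, ?_, ?_, ?_⟩ <;>
      first
        | trivial
        | (push_cast; split_ifs <;> simp_all [beq_iff_eq] <;> omega)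

-- ===== VERDICT (by name: the statement is the Claim_ definition above) =====
theorem summarize_py_spec : Claim_equal_summarize_py := by
  intro events _
  unfold Spec_summarize_py summarize_py summarize_py_alt pvCount
  rw [pvLoopInv]
  simp [PySem.Dict.getD_foldl_insert_add_one]
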